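-- pv_equiv track=rewrite | github.com/HeadHunter483/msu-ling | Syntax/Ver 2.0/tmp/morphres.py | v_morph
-- ===== SOURCE A (Python) =====
-- def v_morph(string):
--     str5=""
--     word = string.split()
--     mas=[]
--     mas2=[]
--
--     for current_word in word:
--         mas.append(current_word.lower())
--
--     while(len(mas2)!=6):
--         mas2.append("-")
--
--     for s in mas:
--         if (s=='pf' or s=='ipf'): #вид
--             mas2[0]=s
--         if (s=='praes' or s=='praet' or s=='fut'): #время
--             mas2[1]=s
--         if (s=='sg' or s=='pl'): #число
--             mas2[2]=s
--         if (s=='indic' or s=='inf' or s=='imper'): #наклонение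
--             mas2[3]=s
--         if (s=='1p' or s=='2p' or s=='3p'): #лицо
--             mas2[5]=s
--
--     i=0
--     for i in range(len(mas2)):
--         str5=str5+' '+mas2[i]
--
--     return str5
-- ===== SOURCE B (Python) =====
-- def v_morph(string):
--     categories = [("pf", "ipf"),
--                   ("praes", "praet", "fut"),
--                   ("sg", "pl"),
--                   ("indic", "inf", "imper"),
--                   (),
--                   ("1p", "2p", "3p")]
--     words = [w.lower() for w in string.split()]
--     out = ""
--     for cat in categories:
--         slot = "-"
--         for w in words:
--             if w in cat:
--                 slot = w
--         out += " " + slot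
--     return out
-- ===== Notes on version B (the rewrite author's own statement) =====
-- stated objective: simpler
-- what changed: B replaces A's single pass with per-slot assignments into a preallocated 6-element list by a data-driven table of categories: one outer loop over the six category tuples with an inner last-match scan of the words, appending each slot directly to the output.
import Mathlib
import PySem

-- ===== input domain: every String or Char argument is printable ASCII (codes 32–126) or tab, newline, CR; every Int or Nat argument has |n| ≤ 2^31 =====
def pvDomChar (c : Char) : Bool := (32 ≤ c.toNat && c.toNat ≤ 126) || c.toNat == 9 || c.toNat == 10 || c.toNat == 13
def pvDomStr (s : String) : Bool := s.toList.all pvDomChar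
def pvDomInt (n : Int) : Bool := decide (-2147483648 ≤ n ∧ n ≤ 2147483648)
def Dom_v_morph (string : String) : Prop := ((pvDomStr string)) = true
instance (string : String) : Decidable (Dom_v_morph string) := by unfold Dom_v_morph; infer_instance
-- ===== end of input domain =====

-- B replaces A's single pass updating six preallocated slots by a table of the six
-- category lists with a per-category last-match scan (same result, simpler decomposition).

-- ===== PORT A =====

-- the `while(len(mas2)!=6): mas2.append("-")` loop, recursing on the remaining count
def vmFill : Nat → List String → List String
  | 0, l => l
  | n + 1, l => vmFill n (l ++ ["-"])

-- body of A's `for s in mas` loop: the five independent `if` statements, in order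
def vmStep (m : List String) (s : String) : List String :=
  let m := if s = "pf" ∨ s = "ipf" then m.set 0 s else m
  let m := if s = "praes" ∨ s = "praet" ∨ s = "fut" then m.set 1 s else m
  let m := if s = "sg" ∨ s = "pl" then m.set 2 s else m
  let m := if s = "indic" ∨ s = "inf" ∨ s = "imper" then m.set 3 s else m
  if s = "1p" ∨ s = "2p" ∨ s = "3p" then m.set 5 s else m

def v_morph (string : String) : String :=
  let word := PySem.Str.split₀ string
  let mas := word.map PySem.Str.lower
  let mas2 := vmFill 6 []
  let mas2 := mas.foldl vmStep mas2
  -- `for i in range(len(mas2)): str5 = str5 + ' ' + mas2[i]`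
  (PySem.List.pyRange 0 mas2.length 1).foldl
    (fun str5 i => str5 ++ " " ++ PySem.List.pyGetD mas2 i "") ""

-- ===== PORT B =====

def vmCategories : List (List String) :=
  [["pf", "ipf"], ["praes", "praet", "fut"], ["sg", "pl"],
   ["indic", "inf", "imper"], [], ["1p", "2p", "3p"]]

-- inner `for w in words: if w in cat: slot = w` scan (slot starts at "-")
def vmLast (cat : List String) (words : List String) : String :=
  words.foldl (fun slot w => if w ∈ cat then w else slot) "-"

def v_morph_alt (string : String) : String :=
  let words := (PySem.Str.split₀ string).map (fun w => PySem.Str.lower w)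
  vmCategories.foldl (fun out cat => out ++ " " ++ vmLast cat words) ""

-- ===== PRECONDITION & SPEC =====
def Spec_v_morph (string : String) (out : String) : Prop := out = v_morph_alt string
instance (string : String) (out : String) : Decidable (Spec_v_morph string out) := by unfold Spec_v_morph; infer_instance

-- ===== CLAIM (what is proved, stated in full; the proofs are below) =====
def Claim_equal_v_morph : Prop := ∀ (string : String), Dom_v_morph string → Spec_v_morph string (v_morph string)

-- ===== LEMMAS AND PROOFS =====

-- A's state fold, componentwise: each slot ends as the last matching word
theorem vm_fold_state (ws : List String) (a b c d e f : String) :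
    ws.foldl vmStep [a, b, c, d, e, f] =
      [ws.foldl (fun s w => if w ∈ (["pf", "ipf"] : List String) then w else s) a,
       ws.foldl (fun s w => if w ∈ (["praes", "praet", "fut"] : List String) then w else s) b,
       ws.foldl (fun s w => if w ∈ (["sg", "pl"] : List String) then w else s) c,
       ws.foldl (fun s w => if w ∈ (["indic", "inf", "imper"] : List String) then w else s) d,
       e,
       ws.foldl (fun s w => if w ∈ (["1p", "2p", "3p"] : List String) then w else s) f] := by
  induction ws generalizing a b c d e f with
  | nil => rfl
  | cons w ws ih =>
    simp only [List.foldl_cons]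
    rw [show vmStep [a, b, c, d, e, f] w =
        [if w ∈ (["pf", "ipf"] : List String) then w else a,
         if w ∈ (["praes", "praet", "fut"] : List String) then w else b,
         if w ∈ (["sg", "pl"] : List String) then w else c,
         if w ∈ (["indic", "inf", "imper"] : List String) then w else d,
         e,
         if w ∈ (["1p", "2p", "3p"] : List String) then w else f] from by
      simp only [vmStep, List.mem_cons, List.not_mem_nil, or_false]
      split_ifs <;> rfl]
    exact ih _ _ _ _ _ _

theorem vm_foldl_empty_cat (ws : List String) :
    ws.foldl (fun s w => if w ∈ ([] : List String) then w else s) "-" = "-" := by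
  induction ws with
  | nil => rfl
  | cons w ws ih => simp only [List.foldl_cons, List.not_mem_nil, if_false]; exact ih


theorem vm_join (a b c d e f : String) :
    (PySem.List.pyRange 0 ((([a, b, c, d, e, f] : List String).length : Int)) 1).foldl
      (fun str5 i => str5 ++ " " ++ PySem.List.pyGetD [a, b, c, d, e, f] i "") "" =
    "" ++ " " ++ a ++ " " ++ b ++ " " ++ c ++ " " ++ d ++ " " ++ e ++ " " ++ f := by
  rw [show (([a, b, c, d, e, f] : List String).length : Int) = (6 : Int) from rfl,
      show PySem.List.pyRange 0 (6 : Int) 1 = [0, 1, 2, 3, 4, 5] from by decide]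
  simp only [List.foldl_cons, List.foldl_nil]
  norm_num [PySem.List.pyGetD]
  rfl

-- ===== VERDICT (by name: the statement is the Claim_ definition above) =====
theorem v_morph_spec : Claim_equal_v_morph := by
  intro string _
  unfold Spec_v_morph v_morph v_morph_alt
  simp only [vmFill, List.nil_append, List.cons_append]
  rw [vm_fold_state, vm_join]
  simp only [vmCategories, vmLast, List.foldl_cons, List.foldl_nil, vm_foldl_empty_cat]
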